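-- pv_equiv track=rewrite | github.com/aleenabankil/gayathri-smart-speak-v3 | app.py | get_xp_for_level
-- ===== SOURCE A (Python) =====
-- def get_xp_for_level(level):
--     """Calculate total XP required to reach a level"""
--     if level <= 1:
--         return 0
--     xp = 0
--     for l in range(1, level):
--         if l == 1:
--             xp += 25
--         else:
--             xp += 30
--     return xp
-- ===== SOURCE B (Python) =====
-- def get_xp_for_level(level):
--     """Calculate total XP required to reach a level (closed form)."""
--     if level <= 1:
--         return 0
--     return 25 + 30 * (level - 2)
-- ===== Notes on version B (the rewrite author's own statement) =====
-- stated objective: faster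
-- what changed: Replaced the per-level accumulation loop by a closed-form arithmetic formula.
import Mathlib
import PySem

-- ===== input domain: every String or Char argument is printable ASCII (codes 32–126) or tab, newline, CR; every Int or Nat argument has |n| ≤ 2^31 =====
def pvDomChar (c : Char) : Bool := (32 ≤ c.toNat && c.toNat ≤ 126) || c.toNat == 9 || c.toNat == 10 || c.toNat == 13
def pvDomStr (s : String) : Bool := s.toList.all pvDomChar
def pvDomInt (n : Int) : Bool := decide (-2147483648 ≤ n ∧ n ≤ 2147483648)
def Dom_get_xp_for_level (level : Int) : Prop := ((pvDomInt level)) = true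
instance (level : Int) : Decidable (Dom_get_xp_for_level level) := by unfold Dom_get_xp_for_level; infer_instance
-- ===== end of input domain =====

-- B replaces A's per-level accumulation loop by a closed-form arithmetic formula (objective: faster, measured).

-- ===== PORT A =====
def get_xp_for_level (level : Int) : Int :=
  if level ≤ 1 then 0
  else
    (PySem.List.pyRange 1 level 1).foldl (fun xp l => if l = 1 then xp + 25 else xp + 30) 0

-- ===== PORT B =====
def get_xp_for_level_alt (level : Int) : Int :=
  if level ≤ 1 then 0
  else 25 + 30 * (level - 2)

-- ===== PRECONDITION & SPEC =====
def Spec_get_xp_for_level (level : Int) (out : Int) : Prop := out = get_xp_for_level_alt level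
instance (level : Int) (out : Int) : Decidable (Spec_get_xp_for_level level out) := by unfold Spec_get_xp_for_level; infer_instance

-- ===== CLAIM (what is proved, stated in full; the proofs are below) =====
def Claim_equal_get_xp_for_level : Prop := ∀ (level : Int), Dom_get_xp_for_level level → Spec_get_xp_for_level level (get_xp_for_level level)

-- ===== LEMMAS AND PROOFS =====

-- The loop over range(2, b) adds 30 each step: starting accumulator x, result x + 30*(b-2).
lemma foldl_thirty (b : Int) (hb : 2 ≤ b) (x : Int) :
    (PySem.List.pyRange 2 b 1).foldl (fun xp l => if l = 1 then xp + 25 else xp + 30) x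
      = x + 30 * (b - 2) := by
  have h : ∀ n : ℕ, ∀ x : Int,
      (PySem.List.pyRange 2 (2 + n) 1).foldl (fun xp l => if l = 1 then xp + 25 else xp + 30) x
        = x + 30 * n := by
    intro n
    induction n with
    | zero =>
        intro x
        simp [PySem.List.pyRange]
    | succ k ih =>
        intro x
        push_cast
        rw [show ((2:Int) + ((k:Int) + 1)) = (2 + (k:Int)) + 1 from by ring]
        rw [PySem.List.pyRange_one_succ_right (by omega)]
        rw [List.foldl_append, ih]
        simp only [List.foldl_cons, List.foldl_nil]
        rw [if_neg (by omega)]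
        ring
  obtain ⟨n, hn⟩ : ∃ n : ℕ, b = 2 + n := ⟨(b - 2).toNat, by omega⟩
  subst hn
  have := h n x
  simpa using this

theorem get_xp_for_level_spec : Claim_equal_get_xp_for_level := by
  intro level _
  unfold Spec_get_xp_for_level get_xp_for_level get_xp_for_level_alt
  by_cases h : level ≤ 1
  · simp [h]
  · simp only [if_neg h]
    have h2 : 2 ≤ level := by omega
    rw [PySem.List.pyRange_one_cons (a := 1) (b := level) (by omega)]
    simp only [List.foldl_cons, if_pos trivial]
    norm_num
    rw [foldl_thirty level h2 25]
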